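-- pv_equiv track=rewrite | github.com/jvanhoef/DBL_group_51 | conversations_db.py | get_conversation_replies
-- ===== SOURCE A (Python) =====
-- def get_conversation_replies(tweet_id, replies_map, allowed_user_ids, _visited=None):
--     """Get all replies using pre-fetched replies map."""
--     if _visited is None:
--         _visited = set()
--
--     if tweet_id in _visited:
--         return []
--
--     _visited.add(tweet_id)
--     all_replies = []
--
--     for reply_id, user_id in replies_map.get(tweet_id, []):
--         if user_id in allowed_user_ids:
--             all_replies.append(reply_id)
--             all_replies.extend(get_conversation_replies(reply_id, replies_map, allowed_user_ids, _visited))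
--
--     return all_replies
-- ===== SOURCE B (Python) =====
-- def get_conversation_replies(tweet_id, replies_map, allowed_user_ids, _visited=None):
--     """Get all replies using pre-fetched replies map (iterative DFS over an explicit stack of iterators)."""
--     if _visited is None:
--         _visited = set()
--     elif tweet_id in _visited:
--         return []
--
--     _visited.add(tweet_id)
--     collected = []
--     stack = [iter(replies_map.get(tweet_id, []))]
--
--     while stack:
--         for reply_id, user_id in stack[-1]:
--             if user_id not in allowed_user_ids:
--                 continue
--             collected.append(reply_id)
--             if reply_id not in _visited:
--                 _visited.add(reply_id)
--                 stack.append(iter(replies_map.get(reply_id, [])))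
--                 break
--         else:
--             stack.pop()
--
--     return collected
-- ===== Notes on version B (the rewrite author's own statement) =====
-- stated objective: alternative
-- what changed: The recursive DFS over the replies map is replaced by an iterative traversal with an explicit stack of per-node remaining-reply lists (Python: a stack of iterators), preserving pre-order output, duplicate appends of already-visited ids, and the mutation of the shared _visited set.
import Mathlib
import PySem

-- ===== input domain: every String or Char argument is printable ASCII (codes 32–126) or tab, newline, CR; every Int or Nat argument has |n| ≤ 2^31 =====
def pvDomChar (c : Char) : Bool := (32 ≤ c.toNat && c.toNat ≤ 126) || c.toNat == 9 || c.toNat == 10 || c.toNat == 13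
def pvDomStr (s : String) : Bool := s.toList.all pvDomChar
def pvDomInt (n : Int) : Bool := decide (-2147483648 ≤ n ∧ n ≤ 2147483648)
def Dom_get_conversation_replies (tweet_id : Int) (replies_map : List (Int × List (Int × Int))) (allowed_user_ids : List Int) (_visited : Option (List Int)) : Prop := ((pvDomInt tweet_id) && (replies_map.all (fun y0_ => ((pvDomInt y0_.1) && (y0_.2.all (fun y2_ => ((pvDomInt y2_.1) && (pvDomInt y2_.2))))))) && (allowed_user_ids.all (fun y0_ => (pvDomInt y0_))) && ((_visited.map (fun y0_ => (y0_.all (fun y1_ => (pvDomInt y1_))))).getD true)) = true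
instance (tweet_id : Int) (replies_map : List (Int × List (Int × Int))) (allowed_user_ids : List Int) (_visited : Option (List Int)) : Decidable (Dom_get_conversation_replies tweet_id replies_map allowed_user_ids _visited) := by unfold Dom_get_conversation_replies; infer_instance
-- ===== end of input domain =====

-- B re-implements A's recursive DFS as an iterative traversal with an explicit stack of
-- per-node remaining-reply lists (Python: a stack of iterators); same return value, and the
-- same mutation of a caller-supplied _visited set in the Python versions.

-- ===== PORT A =====
-- replies_map.get(t, [])  (dict lookup with default)
def pvGetRep (m : List (Int × List (Int × Int))) (t : Int) : List (Int × Int) :=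
  PySem.Dict.getD (PySem.Dict.mk m) t []

-- ids that A's recursion can ever visit: the root plus every reply id in the map
def pvAllIds (t : Int) (m : List (Int × List (Int × Int))) : List Int :=
  t :: m.flatMap (fun kv => kv.2.map Prod.fst)

-- '_visited = set() if None'
def pvInitVis (vis : Option (List Int)) : PySem.Set Int :=
  match vis with
  | none => []
  | some l => PySem.Set.ofList l

-- fuel bound for A's recursion depth (proved sufficient below); fuel is a totality guard only
def pvFuelA (t : Int) (m : List (Int × List (Int × Int))) : Nat :=
  (pvAllIds t m).length + 1

mutual
-- get_conversation_replies(t, …, visited): returns (all_replies, visited after mutation)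
def goA (fuel : Nat) (m : List (Int × List (Int × Int))) (a : List Int)
    (t : Int) (v : PySem.Set Int) : Option (List Int × PySem.Set Int) :=
  match fuel with
  | 0 => none
  | f + 1 =>
    if PySem.Set.contains v t then some ([], v)
    else goLoopA f m a (pvGetRep m t) (PySem.Set.add v t)
termination_by (fuel, 0)
decreasing_by simp_wf; omega
-- the 'for reply_id, user_id in …' loop of A, threading the visited set
def goLoopA (fuel : Nat) (m : List (Int × List (Int × Int))) (a : List Int)
    (pairs : List (Int × Int)) (v : PySem.Set Int) : Option (List Int × PySem.Set Int) :=
  match pairs with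
  | [] => some ([], v)
  | (r, u) :: rest =>
    if a.contains u then
      match goA fuel m a r v with
      | none => none
      | some (o1, v1) =>
        match goLoopA fuel m a rest v1 with
        | none => none
        | some (o2, v2) => some (r :: (o1 ++ o2), v2)
    else goLoopA fuel m a rest v
termination_by (fuel, pairs.length + 1)
decreasing_by all_goals simp_wf; omega
end

def get_conversation_replies (tweet_id : Int) (replies_map : List (Int × List (Int × Int))) (allowed_user_ids : List Int) (_visited : Option (List Int)) : List Int :=
  match goA (pvFuelA tweet_id replies_map) replies_map allowed_user_ids tweet_id
      (pvInitVis _visited) with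
  | some (o, _) => o
  | none => []   -- unreachable: the fuel is proved sufficient below

-- ===== PORT B =====
-- total number of reply pairs in the map (used only for B's fuel bound)
def pvTotalPairs (m : List (Int × List (Int × Int))) : Nat :=
  (m.map (fun kv => kv.2.length)).sum

-- step bound for B's while loop (proved sufficient below); fuel is a totality guard only
def pvFuelB (t : Int) (m : List (Int × List (Int × Int))) : Nat :=
  ((pvAllIds t m).length + 1) * (pvTotalPairs m + 2) + 1

-- B's while loop: stack of the remaining parts of each pushed iterator
def runB (fuel : Nat) (m : List (Int × List (Int × Int))) (a : List Int)
    (stack : List (List (Int × Int))) (v : PySem.Set Int) (acc : List Int) : Option (List Int) :=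
  match fuel with
  | 0 => none
  | g + 1 =>
    match stack with
    | [] => some acc
    | [] :: stk => runB g m a stk v acc                    -- iterator exhausted: pop
    | ((r, u) :: rest) :: stk =>
      if a.contains u then
        if PySem.Set.contains v r then
          runB g m a (rest :: stk) v (acc ++ [r])          -- append, already visited
        else
          runB g m a (pvGetRep m r :: rest :: stk) (PySem.Set.add v r) (acc ++ [r])  -- descend
      else runB g m a (rest :: stk) v acc                  -- filtered out

-- the '_visited.add(tweet_id)' down to 'return collected' part of B, from a start set v
def pvRunMachine (tweet_id : Int) (replies_map : List (Int × List (Int × Int)))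
    (allowed_user_ids : List Int) (v : PySem.Set Int) : List Int :=
  match runB (pvFuelB tweet_id replies_map) replies_map allowed_user_ids
      [pvGetRep replies_map tweet_id] (PySem.Set.add v tweet_id) [] with
  | some o => o
  | none => []   -- unreachable: the fuel is proved sufficient below

def get_conversation_replies_alt (tweet_id : Int) (replies_map : List (Int × List (Int × Int))) (allowed_user_ids : List Int) (_visited : Option (List Int)) : List Int :=
  match _visited with
  | none => pvRunMachine tweet_id replies_map allowed_user_ids []
  | some l =>
    if PySem.Set.contains (PySem.Set.ofList l) tweet_id then []
    else pvRunMachine tweet_id replies_map allowed_user_ids (PySem.Set.ofList l)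

-- ===== PRECONDITION & SPEC =====
def Spec_get_conversation_replies (tweet_id : Int) (replies_map : List (Int × List (Int × Int))) (allowed_user_ids : List Int) (_visited : Option (List Int)) (out : List Int) : Prop := out = get_conversation_replies_alt tweet_id replies_map allowed_user_ids _visited
instance (tweet_id : Int) (replies_map : List (Int × List (Int × Int))) (allowed_user_ids : List Int) (_visited : Option (List Int)) (out : List Int) : Decidable (Spec_get_conversation_replies tweet_id replies_map allowed_user_ids _visited out) := by unfold Spec_get_conversation_replies; infer_instance

-- ===== CLAIM (what is proved, stated in full; the proofs are below) =====
def Claim_equal_get_conversation_replies : Prop := ∀ (tweet_id : Int) (replies_map : List (Int × List (Int × Int))) (allowed_user_ids : List Int) (_visited : Option (List Int)), Dom_get_conversation_replies tweet_id replies_map allowed_user_ids _visited → Spec_get_conversation_replies tweet_id replies_map allowed_user_ids _visited (get_conversation_replies tweet_id replies_map allowed_user_ids _visited)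

-- ===== LEMMAS AND PROOFS =====

-- number of ids of S not yet visited
def ucount (S : List Int) (v : PySem.Set Int) : Nat :=
  (S.filter (fun x => !decide (x ∈ v))).length

-- every reply id occurring in a value of m is in S
def GoodS (m : List (Int × List (Int × Int))) (S : List Int) : Prop :=
  ∀ kv ∈ m, ∀ p ∈ kv.2, p.1 ∈ S

theorem contains_true_of_mem (v : PySem.Set Int) (x : Int) (h : x ∈ v) :
    PySem.Set.contains v x = true := (PySem.Set.contains_iff v x).mpr h

theorem contains_false_of_not_mem (v : PySem.Set Int) (x : Int) (h : x ∉ v) :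
    PySem.Set.contains v x = false := by
  cases hc : PySem.Set.contains v x with
  | true => exact absurd ((PySem.Set.contains_iff v x).mp hc) h
  | false => rfl

theorem mono_all : ∀ f : Nat,
    (∀ m a t v o v', goA f m a t v = some (o, v') → ∀ x, x ∈ v → x ∈ v') ∧
    (∀ m a pairs v o v', goLoopA f m a pairs v = some (o, v') → ∀ x, x ∈ v → x ∈ v') := by
  intro f
  induction f with
  | zero =>
    constructor
    · intro m a t v o v' h
      simp [goA] at h
    · intro m a pairs v o v' h
      induction pairs generalizing v o v' with
      | nil =>
        simp [goLoopA] at h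
        intro x hx; rw [← h.2]; exact hx
      | cons p rest ih =>
        obtain ⟨r, u⟩ := p
        rw [goLoopA] at h
        by_cases hu : u ∈ a
        · simp [hu, goA] at h
        · simp [hu] at h
          exact ih _ _ _ h
  | succ f ihf =>
    have hA : ∀ m a t v o v', goA (f + 1) m a t v = some (o, v') → ∀ x, x ∈ v → x ∈ v' := by
      intro m a t v o v' h
      rw [goA] at h
      by_cases hc : t ∈ v
      · simp [hc] at h
        intro x hx; rw [← h.2]; exact hx
      · simp [hc] at h
        intro x hx
        exact ihf.2 m a _ _ o v' h x (List.mem_append_left _ hx)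
    refine ⟨hA, ?_⟩
    intro m a pairs v o v' h
    induction pairs generalizing v o v' with
    | nil =>
      simp [goLoopA] at h
      intro x hx; rw [← h.2]; exact hx
    | cons p rest ih =>
      obtain ⟨r, u⟩ := p
      rw [goLoopA] at h
      by_cases hu : u ∈ a
      · simp [hu] at h
        split at h
        · exact absurd h (by simp)
        · rename_i o1 v1 hg
          split at h
          · exact absurd h (by simp)
          · rename_i o2 v2 hl
            simp at h
            intro x hx
            rw [← h.2]
            exact ih _ _ _ hl x (hA m a r v o1 v1 hg x hx)
      · simp [hu] at h
        exact ih _ _ _ h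

theorem goA_mono (f : Nat) (m : List (Int × List (Int × Int))) (a : List Int) (t : Int)
    (v : PySem.Set Int) (o : List Int) (v' : PySem.Set Int)
    (h : goA f m a t v = some (o, v')) : ∀ x, x ∈ v → x ∈ v' :=
  (mono_all f).1 m a t v o v' h

theorem ucount_mono (S : List Int) (v w : PySem.Set Int) (h : ∀ x, x ∈ v → x ∈ w) :
    ucount S w ≤ ucount S v := by
  induction S with
  | nil => simp [ucount]
  | cons x S ih =>
    simp only [ucount, List.filter_cons] at ih ⊢
    by_cases hw : x ∈ w
    · have hv' : ¬ (x ∉ w) := fun hc => hc hw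
      by_cases hv : x ∈ v
      · simp [hw, hv]; exact ih
      · simp [hw, hv]; omega
    · have hv : x ∉ v := fun hx => hw (h x hx)
      simp [hw, hv]
      omega

theorem ucount_add_lt (S : List Int) (v : PySem.Set Int) (t : Int) (hS : t ∈ S) (hv : t ∉ v) :
    ucount S (PySem.Set.add v t) < ucount S v := by
  have hmem : ∀ x, x ∈ v → x ∈ PySem.Set.add v t :=
    fun x hx => (PySem.Set.mem_add v t x).mpr (Or.inl hx)
  induction S with
  | nil => simp at hS
  | cons x S ih =>
    have hmono := ucount_mono S v (PySem.Set.add v t) hmem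
    simp only [ucount, List.filter_cons] at ih hmono ⊢
    by_cases hxt : x = t
    · subst hxt
      simp [hv] at hmono ⊢
      omega
    · have hS' : t ∈ S := by
        rcases List.mem_cons.mp hS with h | h
        · exact absurd h.symm hxt
        · exact h
      have hlt := ih hS'
      by_cases hxv : x ∈ v
      · simp [hxv, PySem.Set.mem_add] at hlt ⊢
        omega
      · simp [hxv, hxt, PySem.Set.mem_add] at hlt ⊢
        omega

theorem ucount_zero (S : List Int) (v : PySem.Set Int) (h : ucount S v = 0) :
    ∀ x ∈ S, x ∈ v := by
  intro x hx
  by_contra hxv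
  have hmem : x ∈ S.filter (fun y => !decide (y ∈ v)) :=
    List.mem_filter.mpr ⟨hx, by simp [hxv]⟩
  have := List.length_pos_of_mem hmem
  simp only [ucount] at h
  omega

theorem ucount_le_len (S : List Int) (v : PySem.Set Int) : ucount S v ≤ S.length :=
  List.length_filter_le _ _

theorem getRep_cases (m : List (Int × List (Int × Int))) (t : Int) :
    pvGetRep m t = [] ∨ ∃ kv ∈ m, pvGetRep m t = kv.2 := by
  induction m with
  | nil => left; rfl
  | cons kv rest ih =>
    obtain ⟨k, ps⟩ := kv
    unfold pvGetRep PySem.Dict.getD at ih ⊢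
    rw [PySem.Dict.get?_mk_cons]
    by_cases hk : k == t
    · right
      exact ⟨(k, ps), List.mem_cons_self, by simp [hk]⟩
    · simp only [hk, Bool.false_eq_true, if_false]
      rcases ih with h | ⟨kv', hkv', h⟩
      · left; exact h
      · right; exact ⟨kv', List.mem_cons_of_mem _ hkv', h⟩

theorem getRep_ids (m : List (Int × List (Int × Int))) (S : List Int) (hm : GoodS m S) (t : Int) :
    ∀ p ∈ pvGetRep m t, p.1 ∈ S := by
  rcases getRep_cases m t with h | ⟨kv, hkv, h⟩
  · simp [h]
  · rw [h]; exact hm kv hkv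

theorem getRep_len_le (m : List (Int × List (Int × Int))) (t : Int) :
    (pvGetRep m t).length ≤ pvTotalPairs m := by
  rcases getRep_cases m t with h | ⟨kv, hkv, h⟩
  · simp [h]
  · rw [h]
    unfold pvTotalPairs
    exact List.le_sum_of_mem (List.mem_map_of_mem hkv)

-- fuel adequacy for A
theorem goA_adequate : ∀ f S m a, GoodS m S →
    (∀ t v, t ∈ S → ucount S v ≤ f → (goA (f + 1) m a t v).isSome) ∧
    (∀ pairs v, (∀ p ∈ pairs, p.1 ∈ S) → ucount S v + 1 ≤ f → (goLoopA f m a pairs v).isSome) := by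
  intro f S m a hm
  induction f with
  | zero =>
    constructor
    · intro t v ht hc
      have hv : t ∈ v := ucount_zero S v (Nat.le_zero.mp hc) t ht
      rw [goA]
      simp [hv]
    · intro pairs v _ hc
      omega
  | succ f ihf =>
    have hQ : ∀ pairs v, (∀ p ∈ pairs, p.1 ∈ S) → ucount S v + 1 ≤ f + 1 →
        (goLoopA (f + 1) m a pairs v).isSome := by
      intro pairs
      induction pairs with
      | nil => intro v _ _; rw [goLoopA]; simp
      | cons p rest ih =>
        intro v hids hc
        obtain ⟨r, u⟩ := p
        rw [goLoopA]
        by_cases hu : u ∈ a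
        · have hr : r ∈ S := hids (r, u) List.mem_cons_self
          have hg := ihf.1 r v hr (by omega)
          obtain ⟨⟨o1, v1⟩, hg⟩ := Option.isSome_iff_exists.mp hg
          have hc1 : ucount S v1 + 1 ≤ f + 1 :=
            le_trans (by have := ucount_mono S v v1 (goA_mono _ _ _ _ _ _ _ hg); omega) hc
          have hrest := ih v1 (fun p hp => hids p (List.mem_cons_of_mem _ hp)) hc1
          obtain ⟨⟨o2, v2⟩, hl⟩ := Option.isSome_iff_exists.mp hrest
          simp [hu, hg, hl]
        · have hrest := ih v (fun p hp => hids p (List.mem_cons_of_mem _ hp)) hc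
          simpa [hu] using hrest
    refine ⟨?_, hQ⟩
    intro t v ht hc
    rw [goA]
    by_cases hv : t ∈ v
    · simp [hv]
    · have hlt := ucount_add_lt S v t ht hv
      have h2 := hQ (pvGetRep m t) (PySem.Set.add v t) (getRep_ids m S hm t) (by omega)
      simp [hv] at h2 ⊢
      exact h2

-- runB fuel monotonicity
theorem runB_mono : ∀ g m a stk v acc r, runB g m a stk v acc = some r →
    runB (g + 1) m a stk v acc = some r := by
  intro g m a
  induction g with
  | zero => intro stk v acc r h; simp [runB] at h
  | succ g ih =>
    intro stk v acc r h
    cases stk with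
    | nil => rw [runB] at h ⊢; exact h
    | cons fr stk' =>
      cases fr with
      | nil =>
        rw [runB] at h ⊢
        exact ih _ _ _ _ h
      | cons p rest =>
        obtain ⟨r0, u⟩ := p
        rw [runB] at h ⊢
        split_ifs at h ⊢ with h1 h2 <;> exact ih _ _ _ _ h

theorem runB_mono_le (m : List (Int × List (Int × Int))) (a : List Int)
    (stk : List (List (Int × Int))) (v : PySem.Set Int) (acc r : List Int)
    (g g' : Nat) (hle : g ≤ g') (h : runB g m a stk v acc = some r) :
    runB g' m a stk v acc = some r := by
  induction g' with
  | zero => have : g = 0 := Nat.le_zero.mp hle; subst this; exact h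
  | succ g' ih =>
    rcases Nat.lt_or_ge g (g' + 1) with hlt | hge
    · exact runB_mono g' m a stk v acc r (ih (by omega))
    · have : g = g' + 1 := by omega
      subst this; exact h

-- simulation: one frame of B's machine computes exactly A's loop
theorem simB : ∀ f m a pairs v out v2, goLoopA f m a pairs v = some (out, v2) →
    ∀ stk acc res, (∃ g, runB g m a stk v2 (acc ++ out) = some res) →
    (∃ g, runB g m a (pairs :: stk) v acc = some res) := by
  intro f m a
  induction f with
  | zero =>
    intro pairs
    induction pairs with
    | nil =>
      intro v out v2 h stk acc res ⟨g, hr⟩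
      rw [goLoopA] at h
      simp at h
      obtain ⟨h1, h2⟩ := h
      subst h1; subst h2
      refine ⟨g + 1, ?_⟩
      rw [runB]
      simpa using hr
    | cons p rest ih =>
      intro v out v2 h stk acc res hr
      obtain ⟨r, u⟩ := p
      rw [goLoopA] at h
      by_cases hu : u ∈ a
      · simp [hu, goA] at h
      · simp [hu] at h
        obtain ⟨g, hg⟩ := ih v out v2 h stk acc res hr
        refine ⟨g + 1, ?_⟩
        rw [runB]
        simp [hu]
        exact hg
  | succ f ihf =>
    intro pairs
    induction pairs with
    | nil =>
      intro v out v2 h stk acc res ⟨g, hr⟩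
      rw [goLoopA] at h
      simp at h
      obtain ⟨h1, h2⟩ := h
      subst h1; subst h2
      refine ⟨g + 1, ?_⟩
      rw [runB]
      simpa using hr
    | cons p rest ih =>
      intro v out v2 h stk acc res hr
      obtain ⟨r, u⟩ := p
      rw [goLoopA] at h
      by_cases hu : u ∈ a
      · simp [hu] at h
        split at h
        · exact absurd h (by simp)
        · rename_i o1 v1 hg
          split at h
          · exact absurd h (by simp)
          · rename_i o2 v2' hl
            simp at h
            obtain ⟨hout, hv2⟩ := h
            subst hv2
            rw [goA] at hg
            by_cases hrv : r ∈ v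
            · -- already visited: goA returns ([], v), B appends r and moves on
              simp [hrv] at hg
              obtain ⟨ho1, hv1⟩ := hg
              subst hv1
              have hrest := ih _ _ _ hl stk (acc ++ [r]) res
                (by subst ho1; rw [← hout] at hr; simpa [List.append_assoc] using hr)
              obtain ⟨g, hgr⟩ := hrest
              refine ⟨g + 1, ?_⟩
              rw [runB]
              simp [hu, hrv]
              exact hgr
            · -- descend: push the child frame
              simp [hrv] at hg
              have hchild := ihf _ _ _ _ hg (rest :: stk) (acc ++ [r]) res
              have hrest := ih _ _ _ hl stk (acc ++ [r] ++ o1) res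
                (by rw [← hout] at hr; simpa [List.append_assoc] using hr)
              obtain ⟨g, hgr⟩ := hchild hrest
              refine ⟨g + 1, ?_⟩
              rw [runB]
              simp [hu, hrv]
              simpa using hgr
      · simp [hu] at h
        obtain ⟨g, hg⟩ := ih v out v2 h stk acc res hr
        refine ⟨g + 1, ?_⟩
        rw [runB]
        simp [hu]
        exact hg

-- potential for B's machine
def phi (S : List Int) (m : List (Int × List (Int × Int)))
    (stk : List (List (Int × Int))) (v : PySem.Set Int) : Nat :=
  (stk.map (fun fr => fr.length + 1)).sum + ucount S v * (pvTotalPairs m + 2)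

theorem runB_total : ∀ g S m a stk v acc, GoodS m S →
    (∀ fr ∈ stk, ∀ p ∈ fr, p.1 ∈ S) → phi S m stk v < g →
    (runB g m a stk v acc).isSome := by
  intro g S m a
  induction g with
  | zero => intro stk v acc _ _ hphi; omega
  | succ g ih =>
    intro stk v acc hm hinv hphi
    cases stk with
    | nil => rw [runB]; simp
    | cons fr stk' =>
      cases fr with
      | nil =>
        rw [runB]
        refine ih stk' v acc hm (fun fr h => hinv fr (List.mem_cons_of_mem _ h)) ?_
        simp only [phi, List.map_cons, List.sum_cons] at hphi ⊢
        omega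
      | cons p rest =>
        obtain ⟨r, u⟩ := p
        have hrestinv : ∀ fr ∈ rest :: stk', ∀ q ∈ fr, q.1 ∈ S := by
          intro fr hfr q hq
          rcases List.mem_cons.mp hfr with h | h
          · exact hinv _ List.mem_cons_self q (by rw [h] at hq; exact List.mem_cons_of_mem _ hq)
          · exact hinv _ (List.mem_cons_of_mem _ h) q hq
        rw [runB]
        split_ifs with h1 h2
        · refine ih _ v (acc ++ [r]) hm hrestinv ?_
          simp only [phi, List.map_cons, List.sum_cons, List.length_cons] at hphi ⊢
          omega
        · have hrS : r ∈ S := hinv _ List.mem_cons_self (r, u) List.mem_cons_self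
          have hrv : r ∉ v := fun hc => h2 (contains_true_of_mem _ _ hc)
          have h3 : ucount S (PySem.Set.add v r) + 1 ≤ ucount S v := ucount_add_lt S v r hrS hrv
          have key := Nat.mul_le_mul_right (k := pvTotalPairs m + 2) h3
          rw [Nat.succ_mul] at key
          have hcl := getRep_len_le m r
          refine ih _ (PySem.Set.add v r) (acc ++ [r]) hm ?_ ?_
          · intro fr hfr q hq
            rcases List.mem_cons.mp hfr with h | h
            · exact getRep_ids m S hm r q (by rwa [h] at hq)
            · exact hrestinv fr h q hq
          · simp only [phi, List.map_cons, List.sum_cons, List.length_cons] at hphi ⊢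
            omega
        · refine ih _ v acc hm hrestinv ?_
          simp only [phi, List.map_cons, List.sum_cons, List.length_cons] at hphi ⊢
          omega

-- ===== VERDICT (by name: the statement is the Claim_ definition above) =====
theorem get_conversation_replies_spec : Claim_equal_get_conversation_replies := by
  unfold Claim_equal_get_conversation_replies
  intro t m a vis _dom
  unfold Spec_get_conversation_replies
  have hm : GoodS m (pvAllIds t m) := by
    intro kv hkv p hp
    exact List.mem_cons_of_mem _
      (List.mem_flatMap.mpr ⟨kv, hkv, List.mem_map.mpr ⟨p, hp, rfl⟩⟩)
  have main : ∀ v0 : PySem.Set Int, t ∉ v0 →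
      (match goA (pvFuelA t m) m a t v0 with
       | some (o, _) => o
       | none => []) = pvRunMachine t m a v0 := by
    intro v0 hvt
    have hsome := (goA_adequate (pvAllIds t m).length (pvAllIds t m) m a hm).1 t v0
      List.mem_cons_self (ucount_le_len _ _)
    obtain ⟨⟨out, v'⟩, hg⟩ := Option.isSome_iff_exists.mp hsome
    have hvc : ¬(v0.contains t = true) := by
      rw [contains_false_of_not_mem _ _ hvt]; simp
    unfold pvFuelA
    rw [hg]
    rw [goA, if_neg hvc] at hg
    have hbase : ∃ gg, runB gg m a [] v' (([] : List Int) ++ out) = some out :=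
      ⟨1, by rw [runB]; simp⟩
    have hreach := simB _ m a _ _ _ _ hg [] [] out hbase
    obtain ⟨g1, hg1⟩ := hreach
    have htot := runB_total (pvFuelB t m) (pvAllIds t m) m a
      [pvGetRep m t] (PySem.Set.add v0 t) [] hm
      (by
        intro fr hfr q hq
        rcases List.mem_cons.mp hfr with h | h
        · exact getRep_ids m _ hm t q (by rwa [h] at hq)
        · simp at h)
      (by
        have hcl := getRep_len_le m t
        have huc : ucount (pvAllIds t m) (PySem.Set.add v0 t)
            ≤ (pvAllIds t m).length := ucount_le_len _ _
        have key := Nat.mul_le_mul_right (k := pvTotalPairs m + 2) huc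
        unfold pvFuelB
        simp only [phi, List.map_cons, List.sum_cons, List.map_nil, List.sum_nil]
        rw [Nat.succ_mul]
        omega)
    obtain ⟨x, hx⟩ := Option.isSome_iff_exists.mp htot
    have hx' := runB_mono_le m a _ _ _ _ _ (max g1 (pvFuelB t m)) (Nat.le_max_right _ _) hx
    have hg1' := runB_mono_le m a _ _ _ _ _ (max g1 (pvFuelB t m)) (Nat.le_max_left _ _) hg1
    unfold pvRunMachine
    rw [hx]
    rw [hx'] at hg1'
    exact (Option.some_inj.mp hg1').symm
  cases vis with
  | none =>
    have h0 : t ∉ ([] : PySem.Set Int) := by simp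
    simp only [get_conversation_replies, get_conversation_replies_alt, pvInitVis]
    exact main [] h0
  | some l =>
    simp only [get_conversation_replies, get_conversation_replies_alt, pvInitVis]
    by_cases hvt : t ∈ PySem.Set.ofList l
    · have hvc : (PySem.Set.ofList l).contains t = true := contains_true_of_mem _ _ hvt
      unfold pvFuelA
      rw [goA, if_pos hvc, if_pos hvc]
    · have hvc : ¬((PySem.Set.ofList l).contains t = true) := by
        rw [contains_false_of_not_mem _ _ hvt]; simp
      rw [if_neg hvc]
      exact main (PySem.Set.ofList l) hvt
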